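-- pv_equiv track=rewrite | github.com/sb-ncbr/overprot | OverProtCore/overprot/libs/lib_graphs.py | are_edge_labels_unique_within_each_oriented_path
-- ===== SOURCE A (Python) =====
-- from typing import List, Dict, Set, Tuple, Iterable, Sequence, Optional, NamedTuple, Literal
--
-- class LabeledEdge(NamedTuple):
--     invertex: int
--     outvertex: int
--     label: int
--
-- def are_edge_labels_unique_within_each_oriented_path(edges: List[LabeledEdge]):
--     edge_starts = {u for u, v, lab in edges}
--     edge_ends = {v for u, v, lab in edges}
--     vertices = list(edge_starts | edge_ends)
--     inflowing_labels: Dict[int, Set[int]] = {v: set() for v in vertices}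
--     while True:
--         changed = False
--         for u, v, lab in edges:
--             if lab not in inflowing_labels[v]:
--                 changed = True
--                 inflowing_labels[v].add(lab)
--             if lab in inflowing_labels[u]:
--                 return False
--         if not changed:
--             return True
-- ===== SOURCE B (Python) =====
-- def are_edge_labels_unique_within_each_oriented_path(edges):
--     incoming = {(v, lab) for u, v, lab in edges}
--     return all((u, lab) not in incoming for u, v, lab in edges)
-- ===== Notes on version B (the rewrite author's own statement) =====
-- stated objective: faster
-- what changed: Replaces the fixpoint while-loop maintaining per-vertex inflowing-label sets in a dict with a single pass: build the set of (target, label) pairs once, then check each edge's (start, label) against it.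
import Mathlib
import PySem

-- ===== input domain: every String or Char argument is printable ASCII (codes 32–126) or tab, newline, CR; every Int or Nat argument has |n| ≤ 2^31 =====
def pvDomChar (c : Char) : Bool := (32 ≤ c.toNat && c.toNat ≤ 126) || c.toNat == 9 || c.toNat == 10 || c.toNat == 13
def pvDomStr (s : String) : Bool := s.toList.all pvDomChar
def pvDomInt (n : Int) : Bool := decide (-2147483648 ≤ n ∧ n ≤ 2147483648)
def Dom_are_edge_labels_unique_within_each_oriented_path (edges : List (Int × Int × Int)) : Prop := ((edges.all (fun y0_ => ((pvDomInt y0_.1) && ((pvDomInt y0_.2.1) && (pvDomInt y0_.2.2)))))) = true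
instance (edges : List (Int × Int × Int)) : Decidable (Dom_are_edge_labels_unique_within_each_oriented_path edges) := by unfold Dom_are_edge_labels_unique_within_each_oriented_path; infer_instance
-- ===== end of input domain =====

-- B replaces A's fixpoint while-loop over a dict of per-vertex label sets with a single pass:
-- build the set of (target, label) pairs once, then test each edge's (start, label) against it.

-- ===== PORT A =====
-- inner 'for u, v, lab in edges' loop body; 'none' = the Python 'return False'
def pvPassA : List (Int × Int × Int) → PySem.Dict Int (PySem.Set Int) → Bool →
    Option (PySem.Dict Int (PySem.Set Int) × Bool)
  | [], d, changed => some (d, changed)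
  | (u, v, lab) :: rest, d, changed =>
    -- if lab not in inflowing_labels[v]: changed = True; inflowing_labels[v].add(lab)
    let changed' := if PySem.Set.contains (d.getD v PySem.Set.empty) lab then changed else true
    let d' := if PySem.Set.contains (d.getD v PySem.Set.empty) lab then d
              else d.modify v PySem.Set.empty (fun s => PySem.Set.add s lab)
    -- if lab in inflowing_labels[u]: return False
    if PySem.Set.contains (d'.getD u PySem.Set.empty) lab then none
    else pvPassA rest d' changed'

-- the 'while True' loop; fuel is only a termination guard (edges.length + 2 always suffices:
-- after one completed pass the dict is a fixpoint, so the next pass either returns or stops)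
def pvLoopA (edges : List (Int × Int × Int)) : Nat → PySem.Dict Int (PySem.Set Int) → Bool
  | 0, _ => true
  | fuel + 1, d =>
    match pvPassA edges d false with
    | none => false
    | some (d', changed) => if changed then pvLoopA edges fuel d' else true

def are_edge_labels_unique_within_each_oriented_path (edges : List (Int × Int × Int)) : Bool :=
  let edge_starts := PySem.Set.ofList (edges.map (fun e => e.1))
  let edge_ends := PySem.Set.ofList (edges.map (fun e => e.2.1))
  let vertices := PySem.Set.union edge_starts edge_ends
  let inflowing_labels := vertices.foldl (fun d v => d.insert v PySem.Set.empty) PySem.Dict.empty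
  pvLoopA edges (edges.length + 2) inflowing_labels

-- ===== PORT B =====
def are_edge_labels_unique_within_each_oriented_path_alt (edges : List (Int × Int × Int)) : Bool :=
  let incoming : PySem.Set (Int × Int) := PySem.Set.ofList (edges.map (fun e => (e.2.1, e.2.2)))
  edges.all (fun e => !(PySem.Set.contains incoming (e.1, e.2.2)))

-- ===== PRECONDITION & SPEC =====
def Spec_are_edge_labels_unique_within_each_oriented_path (edges : List (Int × Int × Int)) (out : Bool) : Prop := out = are_edge_labels_unique_within_each_oriented_path_alt edges
instance (edges : List (Int × Int × Int)) (out : Bool) : Decidable (Spec_are_edge_labels_unique_within_each_oriented_path edges out) := by unfold Spec_are_edge_labels_unique_within_each_oriented_path; infer_instance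

-- ===== CLAIM (what is proved, stated in full; the proofs are below) =====
def Claim_equal_are_edge_labels_unique_within_each_oriented_path : Prop := ∀ (edges : List (Int × Int × Int)), Dom_are_edge_labels_unique_within_each_oriented_path edges → Spec_are_edge_labels_unique_within_each_oriented_path edges (are_edge_labels_unique_within_each_oriented_path edges)

-- ===== LEMMAS AND PROOFS =====

theorem pvContains_iff {α : Type} [BEq α] [LawfulBEq α] (s : PySem.Set α) (x : α) :
    PySem.Set.contains s x = true ↔ x ∈ s := by
  simp [PySem.Set.contains]

-- 'there is a vertex with an incoming and an outgoing edge of the same label'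
def pvBad (edges : List (Int × Int × Int)) : Prop :=
  ∃ e ∈ edges, ∃ f ∈ edges, f.2.1 = e.1 ∧ f.2.2 = e.2.2

theorem pvAlt_eq_true_iff (edges : List (Int × Int × Int)) :
    are_edge_labels_unique_within_each_oriented_path_alt edges = true ↔ ¬ pvBad edges := by
  unfold are_edge_labels_unique_within_each_oriented_path_alt pvBad
  rw [List.all_eq_true]
  constructor
  · rintro h ⟨e, he, f, hf, h1, h2⟩
    have h3 := h e he
    rw [Bool.not_eq_eq_eq_not, Bool.not_true, ← Bool.not_eq_true, pvContains_iff] at h3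
    exact h3 ((PySem.Set.mem_ofList _ _).mpr (List.mem_map.mpr ⟨f, hf, by rw [h1, h2]⟩))
  · intro h e he
    rw [Bool.not_eq_eq_eq_not, Bool.not_true, ← Bool.not_eq_true, pvContains_iff]
    intro hmem
    obtain ⟨f, hf, hfe⟩ := List.mem_map.mp ((PySem.Set.mem_ofList _ _).mp hmem)
    rw [Prod.ext_iff] at hfe
    exact h ⟨e, he, f, hf, hfe.1, hfe.2⟩

-- a pass collects exactly the (target, label) pairs of its edges, on top of what was there
theorem pvPassA_mem {rest : List (Int × Int × Int)} {d d' : PySem.Dict Int (PySem.Set Int)}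
    {c c' : Bool} (h : pvPassA rest d c = some (d', c')) (v lab : Int) :
    lab ∈ d'.getD v PySem.Set.empty ↔
      lab ∈ d.getD v PySem.Set.empty ∨ ∃ u, (u, v, lab) ∈ rest := by
  induction rest generalizing d c with
  | nil =>
    simp only [pvPassA, Option.some.injEq, Prod.mk.injEq] at h
    simp [h.1]
  | cons e rest ih =>
    obtain ⟨u0, v0, lab0⟩ := e
    simp only [pvPassA] at h
    by_cases hc : PySem.Set.contains (d.getD v0 PySem.Set.empty) lab0 = true
    · -- label already present at v0: dict and flag unchanged
      simp only [if_pos hc] at h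
      by_cases hc2 : PySem.Set.contains (d.getD u0 PySem.Set.empty) lab0 = true
      · rw [if_pos hc2] at h
        exact absurd h (by simp)
      · rw [if_neg hc2] at h
        rw [ih h]
        constructor
        · rintro (hm | ⟨u, hu⟩)
          · exact Or.inl hm
          · exact Or.inr ⟨u, List.mem_cons_of_mem _ hu⟩
        · rintro (hm | ⟨u, hu⟩)
          · exact Or.inl hm
          · rcases List.mem_cons.mp hu with heq | hu'
            · simp only [Prod.mk.injEq] at heq
              refine Or.inl ?_
              rw [heq.2.1, heq.2.2]
              exact (pvContains_iff _ _).mp hc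
            · exact Or.inr ⟨u, hu'⟩
    · -- new label at v0: it is added
      simp only [if_neg hc] at h
      by_cases hc2 : PySem.Set.contains
          ((d.modify v0 PySem.Set.empty (fun s => PySem.Set.add s lab0)).getD u0 PySem.Set.empty)
          lab0 = true
      · rw [if_pos hc2] at h
        exact absurd h (by simp)
      · rw [if_neg hc2] at h
        rw [ih h, PySem.Dict.getD_modify d v0 v PySem.Set.empty]
        by_cases hv : v = v0
        · subst hv
          rw [if_pos rfl, PySem.Set.mem_add]
          constructor
          · rintro ((hm | rfl) | ⟨u, hu⟩)
            · exact Or.inl hm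
            · exact Or.inr ⟨u0, List.mem_cons_self ..⟩
            · exact Or.inr ⟨u, List.mem_cons_of_mem _ hu⟩
          · rintro (hm | ⟨u, hu⟩)
            · exact Or.inl (Or.inl hm)
            · rcases List.mem_cons.mp hu with heq | hu'
              · simp only [Prod.mk.injEq] at heq
                exact Or.inl (Or.inr heq.2.2)
              · exact Or.inr ⟨u, hu'⟩
        · rw [if_neg hv]
          constructor
          · rintro (hm | ⟨u, hu⟩)
            · exact Or.inl hm
            · exact Or.inr ⟨u, List.mem_cons_of_mem _ hu⟩
          · rintro (hm | ⟨u, hu⟩)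
            · exact Or.inl hm
            · rcases List.mem_cons.mp hu with heq | hu'
              · simp only [Prod.mk.injEq] at heq
                exact absurd heq.2.1 hv
              · exact Or.inr ⟨u, hu'⟩

-- if some edge's label already flows into its start vertex, the pass returns False
theorem pvPassA_none {rest : List (Int × Int × Int)} {d : PySem.Dict Int (PySem.Set Int)}
    {c : Bool} (h : ∃ e ∈ rest, e.2.2 ∈ d.getD e.1 PySem.Set.empty) :
    pvPassA rest d c = none := by
  induction rest generalizing d c with
  | nil => simp at h
  | cons e rest ih =>
    obtain ⟨u0, v0, lab0⟩ := e
    simp only [pvPassA]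
    by_cases hc : PySem.Set.contains (d.getD v0 PySem.Set.empty) lab0 = true
    · simp only [if_pos hc]
      rcases h with ⟨e, he, hm⟩
      rcases List.mem_cons.mp he with rfl | he'
      · rw [if_pos ((pvContains_iff _ _).mpr hm)]
      · by_cases hc2 : PySem.Set.contains (d.getD u0 PySem.Set.empty) lab0 = true
        · rw [if_pos hc2]
        · rw [if_neg hc2]
          exact ih ⟨e, he', hm⟩
    · simp only [if_neg hc]
      have hmono : ∀ k x, x ∈ d.getD k PySem.Set.empty →
          x ∈ (d.modify v0 PySem.Set.empty (fun s => PySem.Set.add s lab0)).getD k PySem.Set.empty := by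
        intro k x hx
        rw [PySem.Dict.getD_modify d v0 k PySem.Set.empty]
        split
        · rename_i hk
          exact (PySem.Set.mem_add _ _ _).mpr (Or.inl (hk ▸ hx))
        · exact hx
      rcases h with ⟨e, he, hm⟩
      rcases List.mem_cons.mp he with rfl | he'
      · rw [if_pos ((pvContains_iff _ _).mpr (hmono _ _ hm))]
      · by_cases hc2 : PySem.Set.contains
            ((d.modify v0 PySem.Set.empty (fun s => PySem.Set.add s lab0)).getD u0 PySem.Set.empty)
            lab0 = true
        · rw [if_pos hc2]
        · rw [if_neg hc2]
          exact ih ⟨e, he', hmono _ _ hm⟩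

-- if no vertex has matching in/out labels and the dict only records actual in-edges, the pass completes
theorem pvPassA_some (edges : List (Int × Int × Int)) (hnb : ¬ pvBad edges) :
    ∀ (rest : List (Int × Int × Int)) (d : PySem.Dict Int (PySem.Set Int)) (c : Bool),
    (∀ e ∈ rest, e ∈ edges) →
    (∀ v lab, lab ∈ d.getD v PySem.Set.empty → ∃ w, (w, v, lab) ∈ edges) →
    ∃ d' c', pvPassA rest d c = some (d', c') := by
  intro rest
  induction rest with
  | nil => intro d c _ _; exact ⟨d, c, rfl⟩
  | cons e rest ih =>
    intro d c hsub hinv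
    obtain ⟨u0, v0, lab0⟩ := e
    have hedge : (u0, v0, lab0) ∈ edges := hsub _ (List.mem_cons_self ..)
    simp only [pvPassA]
    by_cases hc : PySem.Set.contains (d.getD v0 PySem.Set.empty) lab0 = true
    · simp only [if_pos hc]
      rw [if_neg]
      · exact ih d c (fun e he => hsub e (List.mem_cons_of_mem _ he)) hinv
      · intro hcon
        obtain ⟨w, hw⟩ := hinv u0 lab0 ((pvContains_iff _ _).mp hcon)
        exact hnb ⟨(u0, v0, lab0), hedge, (w, u0, lab0), hw, rfl, rfl⟩
    · simp only [if_neg hc]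
      have hinv' : ∀ v lab,
          lab ∈ (d.modify v0 PySem.Set.empty (fun s => PySem.Set.add s lab0)).getD v PySem.Set.empty →
          ∃ w, (w, v, lab) ∈ edges := by
        intro v lab hm
        rw [PySem.Dict.getD_modify d v0 v PySem.Set.empty] at hm
        by_cases hv : v = v0
        · rw [if_pos hv] at hm
          rcases (PySem.Set.mem_add _ _ _).mp hm with hm' | rfl
          · exact hinv v lab (hv ▸ hm')
          · exact ⟨u0, hv ▸ hedge⟩
        · rw [if_neg hv] at hm
          exact hinv v lab hm
      rw [if_neg]
      · exact ih _ true (fun e he => hsub e (List.mem_cons_of_mem _ he)) hinv'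
      · intro hcon
        obtain ⟨w, hw⟩ := hinv' u0 lab0 ((pvContains_iff _ _).mp hcon)
        exact hnb ⟨(u0, v0, lab0), hedge, (w, u0, lab0), hw, rfl, rfl⟩

-- once changed is True it stays True
theorem pvPassA_changed_mono {rest : List (Int × Int × Int)} {d d' : PySem.Dict Int (PySem.Set Int)}
    {c' : Bool} (h : pvPassA rest d true = some (d', c')) : c' = true := by
  induction rest generalizing d with
  | nil =>
    simp only [pvPassA, Option.some.injEq, Prod.mk.injEq] at h
    exact h.2.symm
  | cons e rest ih =>
    obtain ⟨u0, v0, lab0⟩ := e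
    simp only [pvPassA] at h
    by_cases hc : PySem.Set.contains (d.getD v0 PySem.Set.empty) lab0 = true
    · simp only [if_pos hc] at h
      by_cases hc2 : PySem.Set.contains (d.getD u0 PySem.Set.empty) lab0 = true
      · rw [if_pos hc2] at h; exact absurd h (by simp)
      · rw [if_neg hc2] at h; exact ih h
    · simp only [if_neg hc] at h
      by_cases hc2 : PySem.Set.contains
          ((d.modify v0 PySem.Set.empty (fun s => PySem.Set.add s lab0)).getD u0 PySem.Set.empty)
          lab0 = true
      · rw [if_pos hc2] at h; exact absurd h (by simp)
      · rw [if_neg hc2] at h; exact ih h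

-- a pass that reports no change found every (target, label) already present
theorem pvPassA_unchanged {rest : List (Int × Int × Int)} {d d' : PySem.Dict Int (PySem.Set Int)}
    (h : pvPassA rest d false = some (d', false)) :
    ∀ e ∈ rest, e.2.2 ∈ d.getD e.2.1 PySem.Set.empty := by
  induction rest generalizing d with
  | nil => simp
  | cons e rest ih =>
    obtain ⟨u0, v0, lab0⟩ := e
    simp only [pvPassA] at h
    by_cases hc : PySem.Set.contains (d.getD v0 PySem.Set.empty) lab0 = true
    · simp only [if_pos hc] at h
      by_cases hc2 : PySem.Set.contains (d.getD u0 PySem.Set.empty) lab0 = true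
      · rw [if_pos hc2] at h; exact absurd h (by simp)
      · rw [if_neg hc2] at h
        intro e he
        rcases List.mem_cons.mp he with rfl | he'
        · exact (pvContains_iff _ _).mp hc
        · exact ih h e he'
    · simp only [if_neg hc] at h
      by_cases hc2 : PySem.Set.contains
          ((d.modify v0 PySem.Set.empty (fun s => PySem.Set.add s lab0)).getD u0 PySem.Set.empty)
          lab0 = true
      · rw [if_pos hc2] at h; exact absurd h (by simp)
      · rw [if_neg hc2] at h
        exact absurd (pvPassA_changed_mono h) (by simp)

-- if the dict is already a fixpoint and no check fires, the pass returns it unchanged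
theorem pvPassA_fixpoint {rest : List (Int × Int × Int)} {d : PySem.Dict Int (PySem.Set Int)}
    (hfull : ∀ e ∈ rest, e.2.2 ∈ d.getD e.2.1 PySem.Set.empty)
    (hnone : ∀ e ∈ rest, e.2.2 ∉ d.getD e.1 PySem.Set.empty) (c : Bool) :
    pvPassA rest d c = some (d, c) := by
  induction rest with
  | nil => rfl
  | cons e rest ih =>
    obtain ⟨u0, v0, lab0⟩ := e
    simp only [pvPassA]
    simp only [if_pos ((pvContains_iff _ _).mpr (hfull _ (List.mem_cons_self ..)))]
    rw [if_neg (fun hcon => (hnone _ (List.mem_cons_self ..)) ((pvContains_iff _ _).mp hcon))]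
    exact ih (fun e he => hfull e (List.mem_cons_of_mem _ he))
      (fun e he => hnone e (List.mem_cons_of_mem _ he))

-- the initial dict assigns the empty set to every key
theorem pvInit_empty (l : List Int) (d : PySem.Dict Int (PySem.Set Int))
    (h : ∀ v, d.getD v PySem.Set.empty = PySem.Set.empty) :
    ∀ v, (l.foldl (fun d v => d.insert v PySem.Set.empty) d).getD v PySem.Set.empty = PySem.Set.empty := by
  induction l generalizing d with
  | nil => exact h
  | cons x l ih =>
    intro v
    refine ih _ (fun w => ?_) v
    rw [PySem.Dict.getD_insert]
    split
    · rfl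
    · exact h w

theorem pvLoopA_succ (edges : List (Int × Int × Int)) (fuel : Nat)
    (d : PySem.Dict Int (PySem.Set Int)) :
    pvLoopA edges (fuel + 1) d =
      match pvPassA edges d false with
      | none => false
      | some (d', changed) => if changed then pvLoopA edges fuel d' else true := rfl

theorem pvMain (edges : List (Int × Int × Int)) :
    are_edge_labels_unique_within_each_oriented_path edges =
      are_edge_labels_unique_within_each_oriented_path_alt edges := by
  unfold are_edge_labels_unique_within_each_oriented_path
  set d0 := (PySem.Set.union (PySem.Set.ofList (edges.map (fun e => e.1)))
      (PySem.Set.ofList (edges.map (fun e => e.2.1)))).foldl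
      (fun d v => d.insert v PySem.Set.empty) PySem.Dict.empty with hd0
  have h0 : ∀ v, d0.getD v PySem.Set.empty = PySem.Set.empty :=
    pvInit_empty _ _ (fun v => by simp [pysem])
  have h0' : ∀ v lab, lab ∈ d0.getD v PySem.Set.empty → False := by
    intro v lab hm
    rw [h0 v] at hm
    simp [PySem.Set.empty] at hm
  by_cases hb : pvBad edges
  · -- A label flows in and out of some vertex: both sides return False.
    have halt : are_edge_labels_unique_within_each_oriented_path_alt edges = false := by
      by_cases h : are_edge_labels_unique_within_each_oriented_path_alt edges = true
      · exact absurd hb ((pvAlt_eq_true_iff edges).mp h)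
      · exact Bool.eq_false_iff.mpr h
    rw [halt, pvLoopA_succ]
    obtain ⟨e, he, f, hf, h1, h2⟩ := hb
    cases hpass : pvPassA edges d0 false with
    | none => rfl
    | some p =>
      obtain ⟨d1, c1⟩ := p
      have hmem : e.2.2 ∈ d1.getD e.1 PySem.Set.empty := by
        rw [pvPassA_mem hpass]
        exact Or.inr ⟨f.1, by rw [← h1, ← h2]; exact hf⟩
      have hc1 : c1 = true := by
        by_cases h : c1 = true
        · exact h
        · rw [Bool.eq_false_iff.mpr h] at hpass
          exact absurd (pvPassA_unchanged hpass f hf) (fun hm => h0' _ _ hm)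
      subst hc1
      simp only [if_true, pvLoopA_succ]
      rw [pvPassA_none ⟨e, he, hmem⟩]
  · -- No such vertex: both sides return True.
    rw [(pvAlt_eq_true_iff edges).mpr hb, pvLoopA_succ]
    obtain ⟨d1, c1, hpass⟩ := pvPassA_some edges hb edges d0 false (fun e he => he)
      (fun v lab hm => absurd hm (fun hm' => h0' _ _ hm'))
    rw [hpass]
    by_cases hc1 : c1 = true
    · subst hc1
      simp only [if_true, pvLoopA_succ]
      have hinv1 : ∀ v lab, lab ∈ d1.getD v PySem.Set.empty → ∃ w, (w, v, lab) ∈ edges := by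
        intro v lab hm
        rw [pvPassA_mem hpass] at hm
        rcases hm with hm | hm
        · exact absurd hm (fun hm' => h0' _ _ hm')
        · exact hm
      have hfull : ∀ e ∈ edges, e.2.2 ∈ d1.getD e.2.1 PySem.Set.empty := by
        intro e he
        rw [pvPassA_mem hpass]
        exact Or.inr ⟨e.1, he⟩
      have hnone : ∀ e ∈ edges, e.2.2 ∉ d1.getD e.1 PySem.Set.empty := by
        intro e he hcon
        obtain ⟨w, hw⟩ := hinv1 _ _ hcon
        exact hb ⟨e, he, (w, e.1, e.2.2), hw, rfl, rfl⟩
      rw [pvPassA_fixpoint hfull hnone false]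
      rfl
    · rw [Bool.eq_false_iff.mpr hc1]
      simp

-- ===== VERDICT (by name: the statement is the Claim_ definition above) =====
theorem are_edge_labels_unique_within_each_oriented_path_spec : Claim_equal_are_edge_labels_unique_within_each_oriented_path := by
  intro edges _
  exact pvMain edges
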